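-- pv_equiv track=rewrite | github.com/puhoy/adventofcode2020 | 6/second.py | get_answer_lines
-- ===== SOURCE A (Python) =====
-- def get_answer_lines(inp):
--     answers = []
--     current_answer_group = []
--     for line in inp:
--         line = line.strip()
--         if not line:
--             answers.append(current_answer_group[:])
--             current_answer_group = []
--         else:
--             current_answer_group.append(line)
--
--     answers.append(current_answer_group[:])
--     return answers
-- ===== SOURCE B (Python) =====
-- def get_answer_lines(inp):
--     # staged passes: strip everything, tabulate blank-line indices, then
--     # slice between consecutive blanks (plus the trailing slice)
--     stripped = [line.strip() for line in inp]
--     boundaries = [i for i, s in enumerate(stripped) if not s]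
--     groups = []
--     start = 0
--     for b in boundaries:
--         groups.append(stripped[start:b])
--         start = b + 1
--     groups.append(stripped[start:])
--     return groups
-- ===== Notes on version B (the rewrite author's own statement) =====
-- stated objective: alternative
-- what changed: B replaces A's single pass with a current-group buffer by staged passes: it first strips all lines, then builds a table of blank-line indices, and finally slices the stripped list between consecutive blank indices (plus the trailing slice).
import Mathlib
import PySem

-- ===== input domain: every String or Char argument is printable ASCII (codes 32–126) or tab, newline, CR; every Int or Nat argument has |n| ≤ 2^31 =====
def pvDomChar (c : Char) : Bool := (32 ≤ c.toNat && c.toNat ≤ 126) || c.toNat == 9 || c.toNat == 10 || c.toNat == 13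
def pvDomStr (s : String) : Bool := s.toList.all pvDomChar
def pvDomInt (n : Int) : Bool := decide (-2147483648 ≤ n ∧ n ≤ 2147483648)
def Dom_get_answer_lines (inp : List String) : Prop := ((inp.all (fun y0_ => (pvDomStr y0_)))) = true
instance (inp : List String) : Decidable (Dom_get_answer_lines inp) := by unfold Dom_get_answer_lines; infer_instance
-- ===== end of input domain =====

-- B groups lines by staged passes (strip all lines, tabulate blank-line indices,
-- slice between consecutive blanks) instead of A's single pass with a flushed
-- current-group buffer; objective: alternative (same O(n) cost).


-- ===== PORT A =====
-- loop state: (answers, current_answer_group), both accumulated by cons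
-- (i.e. stored reversed, the standard fold representation of Python append),
-- hence the final reverses.
def stepA (st : List (List String) × List String) (line : String) :
    List (List String) × List String :=
  let l := PySem.Str.strip line
  if l = "" then (st.2.reverse :: st.1, [])
  else (st.1, l :: st.2)

def get_answer_lines (inp : List String) : List (List String) :=
  let fin := inp.foldl stepA ([], [])
  (fin.2.reverse :: fin.1).reverse

-- ===== PORT B =====
-- stripped = [line.strip() for line in inp]; boundaries = the blank indices
-- (filterMap over enumerate = the comprehension's filter + projection);
-- then the fold carries (groups, start) and appends one slice per boundary,
-- and stripped[start:] is appended last.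
def get_answer_lines_alt (inp : List String) : List (List String) :=
  let stripped := inp.map PySem.Str.strip
  let boundaries := (PySem.List.enumerate stripped 0).filterMap
    (fun p => if p.2 = "" then some p.1 else none)
  let fin := boundaries.foldl
    (fun st b => (st.1 ++ [PySem.List.slice stripped (some st.2) (some b)], b + 1))
    (([] : List (List String)), (0 : Int))
  fin.1 ++ [PySem.List.slice stripped (some fin.2) none]

-- ===== PRECONDITION & SPEC =====
def Spec_get_answer_lines (inp : List String) (out : List (List String)) : Prop := out = get_answer_lines_alt inp
instance (inp : List String) (out : List (List String)) : Decidable (Spec_get_answer_lines inp out) := by unfold Spec_get_answer_lines; infer_instance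

-- ===== CLAIM (what is proved, stated in full; the proofs are below) =====
def Claim_equal_get_answer_lines : Prop := ∀ (inp : List String), Dom_get_answer_lines inp → Spec_get_answer_lines inp (get_answer_lines inp)

-- ===== LEMMAS AND PROOFS =====

-- canonical splitter on an already-stripped list: both ports are reduced to it
def splitBlank : List String → List (List String)
  | [] => [[]]
  | s :: t =>
    if s = "" then [] :: splitBlank t
    else
      match splitBlank t with
      | h :: ts => (s :: h) :: ts
      | [] => [[s]]

-- ---- A-side reduction ----

def foldrB (l : List String) : List (List String) :=
  l.foldr (fun x acc =>
    let s := PySem.Str.strip x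
    if s = "" then [] :: acc
    else match acc with
         | g :: gs => (s :: g) :: gs
         | [] => [[s]]) [[]]

def consHead (g : List String) : List (List String) → List (List String)
  | [] => [g]
  | h :: t => (g ++ h) :: t

lemma foldrB_eq_splitBlank (l : List String) :
    foldrB l = splitBlank (l.map PySem.Str.strip) := by
  induction l with
  | nil => simp [foldrB, splitBlank]
  | cons x xs ih => simp only [foldrB, List.foldr_cons, List.map_cons, splitBlank] at *; rw [ih]

lemma splitBlank_ne_nil (l : List String) : splitBlank l ≠ [] := by
  induction l with
  | nil => simp [splitBlank]
  | cons x xs ih =>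
    simp only [splitBlank]
    split
    · simp
    · cases h : splitBlank xs <;> simp

lemma foldrB_ne_nil (l : List String) : foldrB l ≠ [] := by
  rw [foldrB_eq_splitBlank]; exact splitBlank_ne_nil _

lemma consHead_nil (l : List (List String)) (h : l ≠ []) : consHead [] l = l := by
  cases l with
  | nil => exact absurd rfl h
  | cons g gs => simp [consHead]

lemma invariant (l : List String) :
    ∀ (ans : List (List String)) (cur : List String),
      (((l.foldl stepA (ans, cur)).2.reverse :: (l.foldl stepA (ans, cur)).1).reverse)
        = ans.reverse ++ consHead cur.reverse (foldrB l) := by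
  induction l with
  | nil =>
    intro ans cur
    simp [foldrB, consHead]
  | cons x xs ih =>
    intro ans cur
    simp only [List.foldl_cons, foldrB, List.foldr_cons]
    show (((xs.foldl stepA (stepA (ans, cur) x)).2.reverse ::
            (xs.foldl stepA (stepA (ans, cur) x)).1).reverse)
        = ans.reverse ++ consHead cur.reverse
            (let s := PySem.Str.strip x
             if s = "" then [] :: foldrB xs
             else match foldrB xs with
                  | g :: gs => (s :: g) :: gs
                  | [] => [[s]])
    by_cases hs : PySem.Str.strip x = ""
    · rw [show stepA (ans, cur) x = (cur.reverse :: ans, []) by simp [stepA, hs]]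
      rw [ih (cur.reverse :: ans) []]
      simp only [hs]
      rw [List.reverse_nil, consHead_nil _ (foldrB_ne_nil xs)]
      simp [consHead]
    · rw [show stepA (ans, cur) x = (ans, PySem.Str.strip x :: cur) by simp [stepA, hs]]
      rw [ih ans (PySem.Str.strip x :: cur)]
      cases h : foldrB xs with
      | nil => exact absurd h (foldrB_ne_nil xs)
      | cons g gs =>
        simp only [h, hs]
        simp [consHead]

-- ---- B-side reduction ----

-- blank indices of an (already-stripped) list, as naturals
def blanksNat : List String → List Nat
  | [] => []
  | x :: t => if x = "" then 0 :: (blanksNat t).map (· + 1) else (blanksNat t).map (· + 1)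

-- the groups the slicing loop produces, phrased over naturals
def groupsFrom (l : List String) (start : Nat) : List Nat → List (List String)
  | [] => [l.drop start]
  | b :: bs => (l.drop start).take (b - start) :: groupsFrom l (b + 1) bs

lemma boundaries_eq (l : List String) (k : Int) :
    (PySem.List.enumerate l k).filterMap (fun p => if p.2 = "" then some p.1 else none)
      = (blanksNat l).map (fun (n : Nat) => k + (n : Int)) := by
  induction l generalizing k with
  | nil => simp [PySem.List.enumerate_nil, blanksNat]
  | cons x t ih =>
    rw [PySem.List.enumerate_cons, List.filterMap_cons]
    by_cases hx : x = ""
    · simp only [hx, ite_true, blanksNat, ih, List.map_cons, List.map_map]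
      refine List.cons_eq_cons.mpr ⟨by simp, ?_⟩
      apply List.map_congr_left; intro n _; simp; ring
    · simp only [blanksNat, hx, ite_false, List.map_map, ih]
      apply List.map_congr_left; intro n _; simp; ring

lemma shift (l : List String) (s : String) (bs : List Nat) :
    ∀ (k : Nat), groupsFrom (s :: l) (k + 1) (bs.map (· + 1)) = groupsFrom l k bs := by
  induction bs with
  | nil => intro k; simp [groupsFrom]
  | cons b t ih =>
    intro k
    simp only [List.map_cons, groupsFrom, List.drop_succ_cons]
    rw [ih (b + 1)]
    congr 2
    omega

lemma groupsFrom_eq_splitBlank (l : List String) :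
    groupsFrom l 0 (blanksNat l) = splitBlank l := by
  induction l with
  | nil => simp [blanksNat, groupsFrom, splitBlank]
  | cons x t ih =>
    by_cases hx : x = ""
    · simp only [blanksNat, hx, splitBlank, ite_true]
      simp only [groupsFrom, List.drop_zero, Nat.sub_self, List.take_zero]
      rw [show (1 : Nat) = 0 + 1 from rfl, shift, ih]
    · simp only [blanksNat, hx, ite_false, splitBlank]
      cases hb : blanksNat t with
      | nil =>
        rw [hb] at ih
        simp only [List.map_nil, groupsFrom, List.drop_zero]
        simp only [groupsFrom] at ih
        rw [← ih]
        simp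
      | cons b bs =>
        rw [hb] at ih
        simp only [List.map_cons, groupsFrom, List.drop_zero, Nat.sub_zero,
          List.take_succ_cons]
        rw [show b + 1 + 1 = b + 1 + 1 from rfl, shift]
        simp only [groupsFrom, List.drop_zero, Nat.sub_zero] at ih
        rw [← ih]

lemma foldB (l : List String) :
    ∀ (bs : List Nat) (acc : List (List String)) (start : Nat),
      (let fin := (bs.map (fun (n : Nat) => (n : Int))).foldl
          (fun st b => (st.1 ++ [PySem.List.slice l (some st.2) (some b)], b + 1))
          (acc, (start : Int))
       fin.1 ++ [PySem.List.slice l (some fin.2) none])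
        = acc ++ groupsFrom l start bs := by
  intro bs
  induction bs with
  | nil =>
    intro acc start
    simp [groupsFrom, PySem.List.slice_from_natCast]
  | cons b t ih =>
    intro acc start
    simp only [List.map_cons, List.foldl_cons]
    have hcast : ((b : Int) + 1) = ((b + 1 : Nat) : Int) := by push_cast; ring
    simp only [hcast]
    rw [ih (acc ++ [PySem.List.slice l (some (start : Int)) (some (b : Int))]) (b + 1)]
    rw [PySem.List.slice_natCast]
    simp [groupsFrom]

-- ===== VERDICT (by name: the statement is the Claim_ definition above) =====
theorem get_answer_lines_spec : Claim_equal_get_answer_lines := by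
  intro inp _
  show get_answer_lines inp = get_answer_lines_alt inp
  have hA : get_answer_lines inp = foldrB inp := by
    have := invariant inp [] []
    simpa [get_answer_lines, consHead_nil _ (foldrB_ne_nil inp)] using this
  have hB : get_answer_lines_alt inp
      = groupsFrom (inp.map PySem.Str.strip) 0 (blanksNat (inp.map PySem.Str.strip)) := by
    show (let stripped := inp.map PySem.Str.strip
          let boundaries := (PySem.List.enumerate stripped 0).filterMap
            (fun p => if p.2 = "" then some p.1 else none)
          let fin := boundaries.foldl
            (fun st b => (st.1 ++ [PySem.List.slice stripped (some st.2) (some b)], b + 1))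
            (([] : List (List String)), (0 : Int))
          fin.1 ++ [PySem.List.slice stripped (some fin.2) none]) = _
    simp only [boundaries_eq _ 0]
    have hmap : (blanksNat (inp.map PySem.Str.strip)).map (fun (n : Nat) => (0 : Int) + (n : Int))
        = (blanksNat (inp.map PySem.Str.strip)).map (fun (n : Nat) => (n : Int)) := by
      apply List.map_congr_left; intro n _; ring
    rw [hmap]
    have := foldB (inp.map PySem.Str.strip) (blanksNat (inp.map PySem.Str.strip)) [] 0
    simpa using this
  rw [hA, hB, foldrB_eq_splitBlank, groupsFrom_eq_splitBlank]
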